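-- pv_equiv track=rewrite | github.com/shirleywang1137/ASTAR-pathfinding | ASTAR.py | find_patients
-- ===== SOURCE A (Python) =====
-- def find_patients(map_data):
--     # vector of patients with their type and positions
--     patients = []
--     for x, row in enumerate(map_data):
--         for y, cell in enumerate(row):
--             if cell in ['N', 'C']:
--                 patients.append((cell, (x, y)))
--     patients.sort(key=lambda x: x[0], reverse=True)
--     return patients
-- ===== SOURCE B (Python) =====
-- def find_patients(map_data):
--     # single pass: bucket 'N' cells and 'C' cells separately, in scan order;
--     # 'N' bucket first matches the stable reverse sort by cell type.
--     ns = []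
--     cs = []
--     for x, row in enumerate(map_data):
--         for y, cell in enumerate(row):
--             if cell == 'N':
--                 ns.append((cell, (x, y)))
--             elif cell == 'C':
--                 cs.append((cell, (x, y)))
--     return ns + cs
-- ===== Notes on version B (the rewrite author's own statement) =====
-- stated objective: simpler
-- what changed: Replaces the collect-then-stable-reverse-sort with a single-pass two-bucket partition ('N' cells then 'C' cells, each in scan order), eliminating the sort entirely.
import Mathlib
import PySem

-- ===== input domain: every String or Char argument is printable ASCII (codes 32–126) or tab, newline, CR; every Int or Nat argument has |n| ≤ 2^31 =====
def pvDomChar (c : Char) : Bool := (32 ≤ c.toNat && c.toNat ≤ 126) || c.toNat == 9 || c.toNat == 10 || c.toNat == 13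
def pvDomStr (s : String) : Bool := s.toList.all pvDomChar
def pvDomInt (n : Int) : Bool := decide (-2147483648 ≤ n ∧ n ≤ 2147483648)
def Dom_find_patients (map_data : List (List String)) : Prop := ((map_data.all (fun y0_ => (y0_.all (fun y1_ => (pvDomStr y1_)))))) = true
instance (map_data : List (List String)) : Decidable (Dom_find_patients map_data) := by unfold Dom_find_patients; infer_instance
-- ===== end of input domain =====

-- B replaces A's collect-then-stable-reverse-sort by a single-pass partition into an 'N' bucket
-- and a 'C' bucket (scan order kept, 'N' bucket first); objective: simpler, no sort.


-- ===== PORT A =====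
def find_patients (map_data : List (List String)) : List (String × (Int × Int)) :=
  let patients :=
    (PySem.List.enumerate map_data).foldl (fun acc xrow =>
      (PySem.List.enumerate xrow.2).foldl (fun acc2 ycell =>
        if ycell.2 ∈ (["N", "C"] : List String) then
          acc2 ++ [(ycell.2, (xrow.1, ycell.1))]
        else acc2) acc) []
  PySem.List.sorted patients (fun p => p.1) true

-- ===== PORT B =====
def find_patients_alt (map_data : List (List String)) : List (String × (Int × Int)) :=
  let buckets :=
    (PySem.List.enumerate map_data).foldl (fun st xrow =>
      (PySem.List.enumerate xrow.2).foldl (fun st2 ycell =>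
        if ycell.2 == "N" then (st2.1 ++ [(ycell.2, (xrow.1, ycell.1))], st2.2)
        else if ycell.2 == "C" then (st2.1, st2.2 ++ [(ycell.2, (xrow.1, ycell.1))])
        else st2) st) (([], []) : List (String × (Int × Int)) × List (String × (Int × Int)))
  buckets.1 ++ buckets.2

-- ===== PRECONDITION & SPEC =====
def Spec_find_patients (map_data : List (List String)) (out : List (String × (Int × Int))) : Prop := out = find_patients_alt map_data
instance (map_data : List (List String)) (out : List (String × (Int × Int))) : Decidable (Spec_find_patients map_data out) := by unfold Spec_find_patients; infer_instance

-- ===== CLAIM (what is proved, stated in full; the proofs are below) =====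
def Claim_equal_find_patients : Prop := ∀ (map_data : List (List String)), Dom_find_patients map_data → Spec_find_patients map_data (find_patients map_data)

-- ===== LEMMAS AND PROOFS =====

-- abbreviations used only by the proofs
def pvIsN (p : String × (Int × Int)) : Bool := p.1 == "N"
def pvIsC (p : String × (Int × Int)) : Bool := p.1 == "C"

-- inserting x into ns ++ cs where x passes nothing in ns and goes before everything in cs
theorem pv_insertBy_mid (before : (String × (Int × Int)) → (String × (Int × Int)) → Bool)
    (x : String × (Int × Int)) (ns cs : List (String × (Int × Int)))
    (h1 : ∀ y ∈ ns, before x y = false) (h2 : ∀ y ∈ cs, before x y = true) :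
    PySem.List.insertBy before x (ns ++ cs) = ns ++ x :: cs := by
  induction ns with
  | nil =>
    rw [List.nil_append, List.nil_append]
    cases cs with
    | nil => rw [PySem.List.insertBy.eq_def]
    | cons c cs' =>
      rw [PySem.List.insertBy.eq_def]
      simp [h2 c List.mem_cons_self]
  | cons n ns' ih =>
    rw [List.cons_append, PySem.List.insertBy.eq_def]
    simp only []
    rw [if_neg (by rw [h1 n List.mem_cons_self]; simp)]
    rw [ih (fun y hy => h1 y (List.mem_cons_of_mem n hy))]
    rfl

-- the insertion-sort fold keeps the state in the shape  (N-part) ++ (C-part)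
theorem pv_ins_fold (P ns cs : List (String × (Int × Int)))
    (hP : ∀ p ∈ P, p.1 = "N" ∨ p.1 = "C")
    (hn : ∀ p ∈ ns, p.1 = "N") (hc : ∀ p ∈ cs, p.1 = "C") :
    P.foldl (fun acc x => PySem.List.insertBy (fun a b => decide (b.1 < a.1)) x acc) (ns ++ cs)
      = (ns ++ P.filter pvIsN) ++ (cs ++ P.filter pvIsC) := by
  induction P generalizing ns cs with
  | nil => simp
  | cons p P' ih =>
    rcases hP p (List.mem_cons_self) with hN | hC
    · have hins : PySem.List.insertBy (fun a b => decide (b.1 < a.1)) p (ns ++ cs) = ns ++ p :: cs := by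
        apply pv_insertBy_mid
        · intro y hy; simp [hn y hy, hN]
        · intro y hy; simp [hc y hy, hN]; decide
      rw [List.foldl_cons, hins]
      have : ns ++ p :: cs = (ns ++ [p]) ++ cs := by simp
      rw [this, ih (ns ++ [p]) cs (fun q hq => hP q (List.mem_cons_of_mem p hq))
            (by intro q hq; rcases List.mem_append.1 hq with h | h
                · exact hn q h
                · simp at h; simp [h, hN]) hc]
      simp [pvIsN, pvIsC, hN]
    · have hins : PySem.List.insertBy (fun a b => decide (b.1 < a.1)) p (ns ++ cs) = (ns ++ cs) ++ [p] := by
        apply PySem.List.insertBy_of_forall_not_before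
        intro y hy
        rcases List.mem_append.1 hy with h | h
        · simp [hn y h, hC]; decide
        · simp [hc y h, hC]
      rw [List.foldl_cons, hins]
      have : (ns ++ cs) ++ [p] = ns ++ (cs ++ [p]) := by simp
      rw [this, ih ns (cs ++ [p]) (fun q hq => hP q (List.mem_cons_of_mem p hq)) hn
            (by intro q hq; rcases List.mem_append.1 hq with h | h
                · exact hc q h
                · simp at h; simp [h, hC])]
      simp [pvIsN, pvIsC, hC]

-- A's collection fold versus B's bucket fold: the filter invariant, inner loop
theorem pv_inner (ys : List (Int × String)) (x : Int) (P : List (String × (Int × Int))) :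
    ys.foldl (fun st2 ycell =>
        if ycell.2 == "N" then (st2.1 ++ [(ycell.2, (x, ycell.1))], st2.2)
        else if ycell.2 == "C" then (st2.1, st2.2 ++ [(ycell.2, (x, ycell.1))])
        else st2) (P.filter pvIsN, P.filter pvIsC)
    = ((ys.foldl (fun acc2 ycell =>
          if ycell.2 ∈ (["N", "C"] : List String) then acc2 ++ [(ycell.2, (x, ycell.1))]
          else acc2) P).filter pvIsN,
       (ys.foldl (fun acc2 ycell =>
          if ycell.2 ∈ (["N", "C"] : List String) then acc2 ++ [(ycell.2, (x, ycell.1))]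
          else acc2) P).filter pvIsC) := by
  induction ys generalizing P with
  | nil => simp
  | cons yc ys' ih =>
    rw [List.foldl_cons, List.foldl_cons]
    by_cases hN : yc.2 = "N"
    · rw [if_pos (by rw [hN]; rfl), if_pos (by rw [hN]; simp)]
      have h1 : (P.filter pvIsN ++ [(yc.2, (x, yc.1))], P.filter pvIsC)
          = ((P ++ [(yc.2, (x, yc.1))]).filter pvIsN, (P ++ [(yc.2, (x, yc.1))]).filter pvIsC) := by
        simp [List.filter_append, pvIsN, pvIsC, hN]
      rw [h1, ih]
    · by_cases hC : yc.2 = "C"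
      · rw [if_neg (by rw [hC]; simp), if_pos (by rw [hC]; rfl), if_pos (by rw [hC]; simp)]
        have h1 : (P.filter pvIsN, P.filter pvIsC ++ [(yc.2, (x, yc.1))])
            = ((P ++ [(yc.2, (x, yc.1))]).filter pvIsN, (P ++ [(yc.2, (x, yc.1))]).filter pvIsC) := by
          simp [List.filter_append, pvIsN, pvIsC, hC]
        rw [h1, ih]
      · rw [if_neg (by simp [hN]), if_neg (by simp [hC]), if_neg (by simp [hN, hC])]
        exact ih P

-- the same invariant, outer loop
theorem pv_outer (rows : List (Int × List String)) (P : List (String × (Int × Int))) :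
    rows.foldl (fun st xrow =>
        (PySem.List.enumerate xrow.2).foldl (fun st2 ycell =>
          if ycell.2 == "N" then (st2.1 ++ [(ycell.2, (xrow.1, ycell.1))], st2.2)
          else if ycell.2 == "C" then (st2.1, st2.2 ++ [(ycell.2, (xrow.1, ycell.1))])
          else st2) st) (P.filter pvIsN, P.filter pvIsC)
    = ((rows.foldl (fun acc xrow =>
          (PySem.List.enumerate xrow.2).foldl (fun acc2 ycell =>
            if ycell.2 ∈ (["N", "C"] : List String) then acc2 ++ [(ycell.2, (xrow.1, ycell.1))]
            else acc2) acc) P).filter pvIsN,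
       (rows.foldl (fun acc xrow =>
          (PySem.List.enumerate xrow.2).foldl (fun acc2 ycell =>
            if ycell.2 ∈ (["N", "C"] : List String) then acc2 ++ [(ycell.2, (xrow.1, ycell.1))]
            else acc2) acc) P).filter pvIsC) := by
  induction rows generalizing P with
  | nil => simp
  | cons r rows' ih =>
    rw [List.foldl_cons, List.foldl_cons]
    rw [pv_inner (PySem.List.enumerate r.2) r.1 P]
    exact ih _

-- every collected cell has type "N" or "C": inner loop
theorem pv_keys_inner (ys : List (Int × String)) (x : Int) (P : List (String × (Int × Int)))
    (hP : ∀ p ∈ P, p.1 = "N" ∨ p.1 = "C") :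
    ∀ p ∈ ys.foldl (fun acc2 ycell =>
        if ycell.2 ∈ (["N", "C"] : List String) then acc2 ++ [(ycell.2, (x, ycell.1))]
        else acc2) P, p.1 = "N" ∨ p.1 = "C" := by
  induction ys generalizing P with
  | nil => exact hP
  | cons yc ys' ih =>
    rw [List.foldl_cons]
    split_ifs with h
    · refine ih _ ?_
      intro q hq
      rcases List.mem_append.1 hq with hq | hq
      · exact hP q hq
      · simp at hq
        simp at h
        rcases h with h | h <;> simp [hq, h]
    · exact ih P hP

-- every collected cell has type "N" or "C": outer loop
theorem pv_keys_outer (rows : List (Int × List String)) (P : List (String × (Int × Int)))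
    (hP : ∀ p ∈ P, p.1 = "N" ∨ p.1 = "C") :
    ∀ p ∈ rows.foldl (fun acc xrow =>
        (PySem.List.enumerate xrow.2).foldl (fun acc2 ycell =>
          if ycell.2 ∈ (["N", "C"] : List String) then acc2 ++ [(ycell.2, (xrow.1, ycell.1))]
          else acc2) acc) P, p.1 = "N" ∨ p.1 = "C" := by
  induction rows generalizing P with
  | nil => exact hP
  | cons r rows' ih =>
    rw [List.foldl_cons]
    exact ih _ (pv_keys_inner (PySem.List.enumerate r.2) r.1 P hP)

-- ===== VERDICT (by name: the statement is the Claim_ definition above) =====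
theorem find_patients_spec : Claim_equal_find_patients := by
  intro map_data _
  unfold Spec_find_patients find_patients find_patients_alt
  have hkeys : ∀ p ∈ (PySem.List.enumerate map_data).foldl (fun acc xrow =>
      (PySem.List.enumerate xrow.2).foldl (fun acc2 ycell =>
        if ycell.2 ∈ (["N", "C"] : List String) then acc2 ++ [(ycell.2, (xrow.1, ycell.1))]
        else acc2) acc) [], p.1 = "N" ∨ p.1 = "C" :=
    pv_keys_outer (PySem.List.enumerate map_data) [] (by simp)
  have hB := pv_outer (PySem.List.enumerate map_data) []
  rw [List.filter_nil, List.filter_nil] at hB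
  have hA := pv_ins_fold ((PySem.List.enumerate map_data).foldl (fun acc xrow =>
      (PySem.List.enumerate xrow.2).foldl (fun acc2 ycell =>
        if ycell.2 ∈ (["N", "C"] : List String) then acc2 ++ [(ycell.2, (xrow.1, ycell.1))]
        else acc2) acc) []) [] [] hkeys (by simp) (by simp)
  rw [List.nil_append, List.nil_append, List.nil_append] at hA
  rw [PySem.List.sorted_rev_eq_foldl_insertBy, hA, hB]
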